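-- pv_equiv track=rewrite | github.com/PetcuRazvan/Programare_Evolutiva_Python | seminar1/main.py | nrLiniiCrescatoare
-- ===== SOURCE A (Python) =====
-- def nrLiniiCrescatoare(matrice):
--     nr = 0
--     for linie in matrice:
--         crescator = True
--         for i in range(len(linie) - 1):
--             if linie[i] >= linie[i + 1]:
--                 crescator = False
--
--         if crescator:
--             nr += 1
--
--     return nr
-- ===== SOURCE B (Python) =====
-- def nrLiniiCrescatoare(matrice):
--     nr = 0
--     for linie in matrice:
--         if sorted(linie) == list(linie) and len(set(linie)) == len(linie):
--             nr += 1
--     return nr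
-- ===== Notes on version B (the rewrite author's own statement) =====
-- stated objective: alternative
-- what changed: Per-row strictness is decided by a sort/dedup characterization (row equals its sorted copy and all elements distinct) instead of A's index-based adjacent-pair scan with a boolean flag.
import Mathlib
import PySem

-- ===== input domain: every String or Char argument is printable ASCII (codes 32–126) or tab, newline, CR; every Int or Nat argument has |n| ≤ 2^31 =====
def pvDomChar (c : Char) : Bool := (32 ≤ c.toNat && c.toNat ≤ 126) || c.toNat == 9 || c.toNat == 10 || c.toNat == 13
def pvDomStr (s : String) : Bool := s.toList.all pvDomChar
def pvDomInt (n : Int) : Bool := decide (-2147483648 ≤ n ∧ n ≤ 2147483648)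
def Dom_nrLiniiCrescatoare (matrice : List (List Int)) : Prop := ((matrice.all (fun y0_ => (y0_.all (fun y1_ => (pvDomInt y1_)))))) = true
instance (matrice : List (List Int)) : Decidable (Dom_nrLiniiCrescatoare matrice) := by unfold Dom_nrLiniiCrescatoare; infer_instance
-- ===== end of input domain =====

-- B decides each row's strictness by the sort/dedup characterization (row == sorted(row) and all
-- elements distinct) instead of A's index-based adjacent-pair scan with a boolean flag; same cost class.

-- ===== PORT A =====
def nrLiniiCrescatoare (matrice : List (List Int)) : Int :=
  matrice.foldl (fun nr linie =>
    let crescator :=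
      (PySem.List.pyRange 0 ((linie.length : Int) - 1) 1).foldl
        (fun c i =>
          if PySem.List.pyGetD linie i 0 ≥ PySem.List.pyGetD linie (i + 1) 0 then false else c)
        true
    if crescator then nr + 1 else nr) 0

-- ===== PORT B =====
def nrLiniiCrescatoare_alt (matrice : List (List Int)) : Int :=
  matrice.foldl (fun nr linie =>
    if PySem.List.sorted linie (fun x => x) false == linie
        && (PySem.Set.ofList linie).length == linie.length
    then nr + 1 else nr) 0

-- ===== PRECONDITION & SPEC =====
def Spec_nrLiniiCrescatoare (matrice : List (List Int)) (out : Int) : Prop := out = nrLiniiCrescatoare_alt matrice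
instance (matrice : List (List Int)) (out : Int) : Decidable (Spec_nrLiniiCrescatoare matrice out) := by unfold Spec_nrLiniiCrescatoare; infer_instance

-- ===== CLAIM (what is proved, stated in full; the proofs are below) =====
def Claim_equal_nrLiniiCrescatoare : Prop := ∀ (matrice : List (List Int)), Dom_nrLiniiCrescatoare matrice → Spec_nrLiniiCrescatoare matrice (nrLiniiCrescatoare matrice)

-- ===== LEMMAS AND PROOFS =====

-- A's flag loop: once false, stays false; result = "no index fired".
theorem foldl_flag_eq_all (L : List Int) (p : Int → Prop) [DecidablePred p] (c : Bool) :
    L.foldl (fun c i => if p i then false else c) c = (c && L.all (fun i => !decide (p i))) := by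
  induction L generalizing c with
  | nil => simp
  | cons a t ih =>
    simp only [List.foldl_cons, List.all_cons, ih]
    by_cases h : p a <;> simp [h]

-- A's per-row flag is true iff the row is strictly increasing (Pairwise <).
theorem flagA_iff (l : List Int) :
    ((PySem.List.pyRange 0 ((l.length : Int) - 1) 1).foldl
      (fun c i =>
        if PySem.List.pyGetD l i 0 ≥ PySem.List.pyGetD l (i + 1) 0 then false else c)
      true = true) ↔ l.Pairwise (· < ·) := by
  rw [foldl_flag_eq_all _ (fun i => PySem.List.pyGetD l i 0 ≥ PySem.List.pyGetD l (i + 1) 0)]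
  rw [← List.isChain_iff_pairwise, List.isChain_iff_getElem]
  simp only [Bool.true_and, List.all_eq_true]
  constructor
  · intro h i hi
    have hm : (i : Int) ∈ PySem.List.pyRange 0 ((l.length : Int) - 1) 1 := by
      rw [PySem.List.mem_pyRange_one]; omega
    have := h _ hm
    rw [PySem.List.pyGetD_eq_getElem l (i := (i : Int)) 0 (by omega) (by omega),
        PySem.List.pyGetD_eq_getElem l (i := (i : Int) + 1) 0 (by omega) (by omega)] at this
    simp only [Bool.not_eq_eq_eq_not, Bool.not_true, decide_eq_false_iff_not, not_le] at this
    have e1 : ((i : Int)).toNat = i := by omega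
    have e2 : ((i : Int) + 1).toNat = i + 1 := by omega
    simpa [e1, e2] using this
  · intro h i hm
    rw [PySem.List.mem_pyRange_one] at hm
    have hi : i.toNat + 1 < l.length := by omega
    have := h i.toNat hi
    rw [PySem.List.pyGetD_eq_getElem l (i := i) 0 (by omega) (by omega),
        PySem.List.pyGetD_eq_getElem l (i := i + 1) 0 (by omega) (by omega)]
    have e2 : (i + 1).toNat = i.toNat + 1 := by omega
    simp only [Bool.not_eq_eq_eq_not, Bool.not_true, decide_eq_false_iff_not, not_le, e2]
    exact this

-- deduplication preserves length iff the list had no duplicates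
theorem nodup_of_length_ofList (l : List Int) (h : (PySem.Set.ofList l).length = l.length) :
    l.Nodup := by
  have hfin : (PySem.Set.ofList l).toFinset = l.toFinset := by
    ext x; simp [PySem.Set.mem_ofList]
  have hcard : l.toFinset.card = l.length := by
    rw [← hfin, List.toFinset_card_of_nodup (PySem.Set.nodup_ofList l), h]
  have hd : l.dedup.length = l.length := by
    rw [← List.card_toFinset, hcard]
  exact List.dedup_eq_self.mp ((List.dedup_sublist l).eq_of_length hd)

-- B's per-row test is true iff the row is strictly increasing (Pairwise <).
theorem testB_iff (l : List Int) :
    ((PySem.List.sorted l (fun x => x) false == l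
        && (PySem.Set.ofList l).length == l.length) = true) ↔ l.Pairwise (· < ·) := by
  simp only [Bool.and_eq_true, beq_iff_eq]
  constructor
  · rintro ⟨hs, hn⟩
    have hle : l.Pairwise (· ≤ ·) := by
      have := PySem.List.sorted_pairwise l (fun x => x) (κ := Int)
      rw [hs] at this
      exact this
    have hnd : l.Nodup := nodup_of_length_ofList l hn
    exact (hle.and hnd).imp (fun h => lt_of_le_of_ne h.1 h.2)
  · intro h
    have hnd : l.Nodup := h.imp (fun h => ne_of_lt h)
    refine ⟨?_, by rw [PySem.Set.ofList_eq_self_of_nodup l hnd]⟩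
    exact PySem.List.sorted_eq_self_of_pairwise l (fun x => x) (h.imp (fun h => le_of_lt h))

theorem per_row (l : List Int) :
    ((PySem.List.pyRange 0 ((l.length : Int) - 1) 1).foldl
      (fun c i =>
        if PySem.List.pyGetD l i 0 ≥ PySem.List.pyGetD l (i + 1) 0 then false else c)
      true)
    = (PySem.List.sorted l (fun x => x) false == l
        && (PySem.Set.ofList l).length == l.length) := by
  rcases Bool.eq_false_or_eq_true (PySem.List.sorted l (fun x => x) false == l
        && (PySem.Set.ofList l).length == l.length) with hb | hb
  · rw [hb]
    exact (flagA_iff l).mpr ((testB_iff l).mp hb)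
  · rw [hb, ← Bool.not_eq_true]
    intro hp
    rw [(testB_iff l).mpr ((flagA_iff l).mp hp)] at hb
    exact Bool.false_ne_true hb.symm

-- ===== VERDICT (by name: the statement is the Claim_ definition above) =====
theorem nrLiniiCrescatoare_spec : Claim_equal_nrLiniiCrescatoare := by
  intro matrice _
  unfold Spec_nrLiniiCrescatoare nrLiniiCrescatoare nrLiniiCrescatoare_alt
  induction matrice using List.reverseRecOn with
  | nil => rfl
  | append_singleton t l ih =>
    simp only [List.foldl_append, List.foldl_cons, List.foldl_nil, per_row]
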